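-- pv_equiv track=rewrite | github.com/ryanholmdahl/cs273b | target_proteins_rnn/src/utils.py | go2words
-- ===== SOURCE A (Python) =====
-- def go2words(go):
--     words = go.split(' ')
--     for idx, word in enumerate(words):
--         word = word.replace("[", "")
--         word = word.replace("]", "")
--         word = word.replace(",","")
--         words[idx] = word
--     return words
-- ===== SOURCE B (Python) =====
-- def go2words(go):
--     cleaned = go.translate(str.maketrans('', '', '[],'))
--     return cleaned.split(' ')
-- ===== Notes on version B (the rewrite author's own statement) =====
-- stated objective: idiomatic
-- what changed: B deletes the three bracket/comma characters in one table-driven str.translate pass over the whole string and then splits on spaces, instead of A's split followed by a per-word enumerate loop with three chained replace calls.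
import Mathlib
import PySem

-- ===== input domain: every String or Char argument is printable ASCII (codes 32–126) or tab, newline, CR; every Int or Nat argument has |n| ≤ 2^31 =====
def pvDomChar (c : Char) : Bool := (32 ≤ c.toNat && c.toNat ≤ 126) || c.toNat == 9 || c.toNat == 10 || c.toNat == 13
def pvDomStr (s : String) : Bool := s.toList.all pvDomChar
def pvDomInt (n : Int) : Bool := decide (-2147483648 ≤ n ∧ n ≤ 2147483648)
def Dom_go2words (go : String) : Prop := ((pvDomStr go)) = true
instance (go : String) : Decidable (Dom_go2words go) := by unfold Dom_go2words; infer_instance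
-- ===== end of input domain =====

-- B deletes the three characters in one pass over the whole string, then splits; A splits first
-- and rewrites each word with three chained replaces. Same return value; idiomatic decomposition.

-- ===== PORT A =====
-- words = go.split(' '); for each word: replace '[', then ']', then ',' by ''; write back
def go2words (go : String) : List String :=
  ((PySem.Str.split? go " ").getD []).map (fun word =>
    PySem.Str.replace (PySem.Str.replace (PySem.Str.replace word "[" "") "]" "") "," "")

-- ===== PORT B =====
-- cleaned = go.translate(str.maketrans('', '', '[],'))  -- delete '[', ']', ',' in one pass
-- return cleaned.split(' ')
def go2words_alt (go : String) : List String :=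
  let cleaned := String.ofList (go.toList.filter (fun c => !(c == '[' || c == ']' || c == ',')))
  (PySem.Str.split? cleaned " ").getD []

-- ===== PRECONDITION & SPEC =====
def Spec_go2words (go : String) (out : List String) : Prop := out = go2words_alt go
instance (go : String) (out : List String) : Decidable (Spec_go2words go out) := by unfold Spec_go2words; infer_instance

-- ===== CLAIM (what is proved, stated in full; the proofs are below) =====
def Claim_equal_go2words : Prop := ∀ (go : String), Dom_go2words go → Spec_go2words go (go2words go)

-- ===== LEMMAS AND PROOFS =====

-- clean recursion describing splitOn.go with single-char separator ' '
def splitCh : List Char → List Char → List (List Char)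
  | [], cur => [cur.reverse]
  | c :: t, cur => if c = ' ' then cur.reverse :: splitCh t [] else splitCh t (c :: cur)

theorem splitOn_go_eq (l : List Char) : ∀ (fuel : Nat) (cur : List Char) (accs : List (List Char)),
    l.length ≤ fuel →
    PySem.Chars.splitOn.go [' '] fuel l cur accs = accs.reverse ++ splitCh l cur := by
  induction l with
  | nil =>
    intro fuel cur accs _
    cases fuel with
    | zero => simp [PySem.Chars.splitOn.go, splitCh]
    | succ k => simp [PySem.Chars.splitOn.go, splitCh]
  | cons c t ih =>
    intro fuel cur accs hlen
    cases fuel with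
    | zero => simp at hlen
    | succ k =>
      have ht : t.length ≤ k := by simpa using hlen
      by_cases hc : c = ' '
      · subst hc
        simp only [PySem.Chars.splitOn.go, List.isPrefixOf, beq_self_eq_true, if_true, List.length_cons, List.length_nil, List.drop_succ_cons, List.drop_zero, Bool.and_true]
        rw [ih k [] (cur.reverse :: accs) ht]
        simp [splitCh]
      · have hpre : [' '].isPrefixOf (c :: t) = false := by
          simp [List.isPrefixOf]
          exact fun h => hc h.symm
        simp only [PySem.Chars.splitOn.go, hpre]
        rw [ih k (c :: cur) accs ht]
        simp [splitCh, hc]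

theorem splitOn_eq (s : List Char) : PySem.Chars.splitOn s [' '] = splitCh s [] := by
  unfold PySem.Chars.splitOn
  rw [splitOn_go_eq s (s.length + 1) [] [] (by omega)]
  simp

-- replace with a single-char pattern and empty replacement is a filter
theorem replace_go_eq (c : Char) (l : List Char) : ∀ (fuel : Nat) (acc : List Char),
    l.length ≤ fuel →
    PySem.Chars.replace.go [c] [] fuel l acc = acc.reverse ++ l.filter (fun x => !(x == c)) := by
  induction l with
  | nil =>
    intro fuel acc _
    cases fuel with
    | zero => simp [PySem.Chars.replace.go]
    | succ k => simp [PySem.Chars.replace.go]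
  | cons d t ih =>
    intro fuel acc hlen
    cases fuel with
    | zero => simp at hlen
    | succ k =>
      have ht : t.length ≤ k := by simpa using hlen
      by_cases hd : d = c
      · subst hd
        simp only [PySem.Chars.replace.go, List.isPrefixOf, beq_self_eq_true, if_true, List.length_cons, List.length_nil, List.drop_succ_cons, List.drop_zero, Bool.and_true, List.reverse_nil, List.nil_append]
        rw [ih k acc ht]
        simp [List.filter]
      · have hpre : [c].isPrefixOf (d :: t) = false := by
          simp [List.isPrefixOf]
          exact fun h => hd h.symm
        simp only [PySem.Chars.replace.go, hpre]
        rw [ih k (d :: acc) ht]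
        have hb : (d == c) = false := beq_eq_false_iff_ne.mpr hd
        simp [List.filter, hb]

theorem replace_eq_filter (s : List Char) (c : Char) :
    PySem.Chars.replace s [c] [] = s.filter (fun x => !(x == c)) := by
  unfold PySem.Chars.replace
  rw [if_neg (by simp), replace_go_eq c s s.length [] (le_refl _)]
  simp

-- splitting on ' ' commutes with filtering by a predicate that keeps ' '
theorem splitCh_filter (p : Char → Bool) (hp : p ' ' = true) :
    ∀ (l cur : List Char), splitCh (l.filter p) (cur.filter p) = (splitCh l cur).map (List.filter p) := by
  intro l
  induction l with
  | nil => intro cur; simp [splitCh, List.filter_reverse]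
  | cons c t ih =>
    intro cur
    by_cases hpc : p c = true
    · by_cases hc : c = ' '
      · subst hc
        simp only [List.filter, hpc, splitCh]
        have := ih []
        simpa using this
      · simp only [List.filter, hpc, splitCh, if_neg hc]
        have := ih (c :: cur)
        simpa [List.filter, hpc] using this
    · have hc : c ≠ ' ' := by intro h; rw [h, hp] at hpc; exact hpc rfl
      simp only [List.filter, hpc, splitCh, if_neg hc]
      have := ih (c :: cur)
      simpa [List.filter, hpc] using this

theorem three_replaces_eq_filter (w : List Char) :
    PySem.Chars.replace (PySem.Chars.replace (PySem.Chars.replace w ['['] []) [']'] []) [','] []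
      = w.filter (fun c => !(c == '[' || c == ']' || c == ',')) := by
  rw [replace_eq_filter, replace_eq_filter, replace_eq_filter, List.filter_filter, List.filter_filter]
  apply List.filter_congr
  intro c _
  cases h1 : c == '[' <;> cases h2 : c == ']' <;> cases h3 : c == ',' <;> simp_all

-- ===== VERDICT (by name: the statement is the Claim_ definition above) =====
theorem go2words_spec : Claim_equal_go2words := by
  intro go _
  unfold Spec_go2words go2words go2words_alt
  have hsp : (" " : String).toList = [' '] := by decide
  have hl : ("[" : String).toList = ['['] := by decide
  have hr : ("]" : String).toList = [']'] := by decide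
  have hcm : ("," : String).toList = [','] := by decide
  have he : ("" : String).toList = [] := by decide
  simp only [PySem.Str.split?, PySem.Chars.split?, PySem.Str.replace, hsp, hl, hr, hcm, he,
    String.toList_ofList]
  rw [if_neg (by simp), if_neg (by simp)]
  simp only [Option.getD_some, Option.map_some]
  rw [splitOn_eq, splitOn_eq, List.map_map]
  have := splitCh_filter (fun c => !(c == '[' || c == ']' || c == ',')) (by decide) go.toList []
  simp only [List.filter_nil] at this
  rw [this, List.map_map]
  congr 1
  funext w
  simp [Function.comp, three_replaces_eq_filter]
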